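-- pv_equiv track=rewrite | github.com/recluse-audio/KSC | SCRIPTS/refresh_default_game_state.py | sort_group
-- ===== SOURCE A (Python) =====
-- def sort_group(
--     entries: dict[str, bool],
--     defaults: dict[str, tuple[bool, bool]],
-- ) -> dict[str, bool]:
--     """Sort a location group: isRoot entries first, then alphabetical."""
--     def sort_key(k: str) -> tuple[int, str]:
--         is_root = defaults.get(k, (False, False))[1]
--         return (0 if is_root else 1, k)
--     return {k: entries[k] for k in sorted(entries, key=sort_key)}
-- ===== SOURCE B (Python) =====
-- def sort_group(
--     entries: dict[str, bool],
--     defaults: dict[str, tuple[bool, bool]],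
-- ) -> dict[str, bool]:
--     """Sort a location group: isRoot entries first, then alphabetical."""
--     roots: list[str] = []
--     others: list[str] = []
--     for k in sorted(entries):
--         if defaults.get(k, (False, False))[1]:
--             roots.append(k)
--         else:
--             others.append(k)
--     return {k: entries[k] for k in roots + others}
-- ===== Notes on version B (the rewrite author's own statement) =====
-- stated objective: alternative
-- what changed: Replaces the single composite-key (rank, name) sort by one plain alphabetical sort followed by a stable-partition loop that appends each key to a roots or non-roots bucket, then concatenates roots first.
import Mathlib
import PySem

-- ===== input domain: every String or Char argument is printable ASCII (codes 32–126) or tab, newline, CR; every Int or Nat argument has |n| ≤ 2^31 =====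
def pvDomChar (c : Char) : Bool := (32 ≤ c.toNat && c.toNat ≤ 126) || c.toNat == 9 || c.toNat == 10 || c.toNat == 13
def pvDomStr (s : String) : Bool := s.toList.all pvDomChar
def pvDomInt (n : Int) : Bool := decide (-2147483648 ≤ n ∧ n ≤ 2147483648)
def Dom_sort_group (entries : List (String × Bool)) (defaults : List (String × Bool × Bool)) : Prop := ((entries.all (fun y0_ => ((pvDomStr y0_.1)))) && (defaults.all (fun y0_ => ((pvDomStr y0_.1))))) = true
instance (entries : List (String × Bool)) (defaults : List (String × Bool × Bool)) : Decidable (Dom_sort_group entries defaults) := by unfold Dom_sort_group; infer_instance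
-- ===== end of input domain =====

-- B replaces A's single composite-key (rank, name) sort by one plain alphabetical sort
-- followed by a stable-partition loop into root / non-root buckets, concatenated roots first.


-- ===== PORT A =====
-- 'sort_key(k)[0]': 0 if defaults.get(k, (False, False))[1] else 1
def pvSortKeyRank (defaults : List (String × Bool × Bool)) (k : String) : Int :=
  if ((PySem.Dict.ofList defaults).getD k (false, false)).2 then 0 else 1

def sort_group (entries : List (String × Bool)) (defaults : List (String × Bool × Bool)) : List (String × Bool) :=
  let d := PySem.Dict.ofList entries
  (PySem.List.sorted2 d.keys (pvSortKeyRank defaults) (fun k => k)).map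
    (fun k => (k, d.getD k false))

-- ===== PORT B =====
def sort_group_alt (entries : List (String × Bool)) (defaults : List (String × Bool × Bool)) : List (String × Bool) :=
  let d := PySem.Dict.ofList entries
  -- the for-loop over sorted(entries), appending each key to the roots or others bucket
  let buckets := (PySem.List.sorted d.keys (fun k => k)).foldl
    (fun (acc : List String × List String) k =>
      if ((PySem.Dict.ofList defaults).getD k (false, false)).2
      then (acc.1 ++ [k], acc.2)
      else (acc.1, acc.2 ++ [k]))
    ([], [])
  (buckets.1 ++ buckets.2).map (fun k => (k, d.getD k false))

-- ===== PRECONDITION & SPEC =====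
def Spec_sort_group (entries : List (String × Bool)) (defaults : List (String × Bool × Bool)) (out : List (String × Bool)) : Prop := out = sort_group_alt entries defaults
instance (entries : List (String × Bool)) (defaults : List (String × Bool × Bool)) (out : List (String × Bool)) : Decidable (Spec_sort_group entries defaults out) := by unfold Spec_sort_group; infer_instance

-- ===== CLAIM (what is proved, stated in full; the proofs are below) =====
def Claim_equal_sort_group : Prop := ∀ (entries : List (String × Bool)) (defaults : List (String × Bool × Bool)), Dom_sort_group entries defaults → Spec_sort_group entries defaults (sort_group entries defaults)

-- ===== LEMMAS AND PROOFS =====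

-- inserting past a prefix x is never placed before
theorem pv_insertBy_append_of_false {α : Type} (before : α → α → Bool) (x : α) (A B : List α)
    (h : ∀ y ∈ A, before x y = false) :
    PySem.List.insertBy before x (A ++ B) = A ++ PySem.List.insertBy before x B := by
  induction A with
  | nil => simp
  | cons a A ih =>
    have ha := h a (by simp)
    simp [PySem.List.insertBy, ha]
    exact ih (fun y hy => h y (by simp [hy]))

-- inserting into the first bucket of a two-bucket list: inside A 'before' agrees with 'b2',
-- and x goes before everything in B
theorem pv_insertBy_append_bucket {α : Type} (before b2 : α → α → Bool) (x : α) (A B : List α)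
    (hA : ∀ y ∈ A, before x y = b2 x y) (hB : ∀ y ∈ B, before x y = true) :
    PySem.List.insertBy before x (A ++ B) = PySem.List.insertBy b2 x A ++ B := by
  induction A with
  | nil =>
    cases B with
    | nil => simp [PySem.List.insertBy]
    | cons b B => simp [PySem.List.insertBy, hB b (by simp)]
  | cons a A ih =>
    have ha := hA a (by simp)
    by_cases hb : b2 x a
    · simp [PySem.List.insertBy, ha, hb]
    · simp [PySem.List.insertBy, ha, hb]
      exact ih (fun y hy => hA y (by simp [hy]))

-- A stable sort by the composite key (0/1 rank, name) is the concatenation of the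
-- alphabetical sorts of the two rank buckets.
theorem pv_sorted2_bucket (r : String → Bool) (keys : List String) :
    PySem.List.sorted2 keys (fun k => if r k then (0 : Int) else 1) (fun k => k) =
    PySem.List.sorted (keys.filter (fun k => r k)) (fun k => k) ++
      PySem.List.sorted (keys.filter (fun k => !r k)) (fun k => k) := by
  induction keys using List.reverseRecOn with
  | nil => simp [PySem.List.sorted2, PySem.List.sorted]
  | append_singleton ys x ih =>
    have hmemA : ∀ y ∈ PySem.List.sorted (ys.filter (fun k => r k)) (fun k => k), r y = true := by
      intro y hy
      have := (PySem.List.mem_sorted _ _ _ _).1 hy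
      simpa using (List.mem_filter.1 this).2
    have hmemB : ∀ y ∈ PySem.List.sorted (ys.filter (fun k => !r k)) (fun k => k), r y = false := by
      intro y hy
      have := (PySem.List.mem_sorted _ _ _ _).1 hy
      simpa using (List.mem_filter.1 this).2
    have hfoldl2 : PySem.List.sorted2 (ys ++ [x]) (fun k => if r k then (0 : Int) else 1) (fun k => k)
        = PySem.List.insertBy
            (fun a b => decide ((if r a then (0 : Int) else 1) < (if r b then (0 : Int) else 1)) ||
              (!decide ((if r b then (0 : Int) else 1) < (if r a then (0 : Int) else 1)) && decide (a < b)))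
            x (PySem.List.sorted2 ys (fun k => if r k then (0 : Int) else 1) (fun k => k)) := by
      simp [PySem.List.sorted2, List.foldl_append]
    have hfoldl1 : ∀ (l : List String),
        PySem.List.sorted (l ++ [x]) (fun k => k)
        = PySem.List.insertBy (fun a b => decide (a < b)) x (PySem.List.sorted l (fun k => k)) := by
      intro l
      rw [PySem.List.sorted_eq_foldl_insertBy, PySem.List.sorted_eq_foldl_insertBy, List.foldl_append]
      simp
    by_cases hx : r x
    · rw [hfoldl2, ih]
      rw [List.filter_append, List.filter_append]
      simp only [List.filter_cons, List.filter_nil, hx]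
      simp only [Bool.not_true, if_pos, Bool.false_eq_true, ite_false]
      rw [List.append_nil, hfoldl1]
      apply pv_insertBy_append_bucket
      · intro y hy
        simp [hx, hmemA y hy]
      · intro y hy
        simp [hx, hmemB y hy]
    · rw [hfoldl2, ih]
      rw [List.filter_append, List.filter_append]
      simp only [List.filter_cons, List.filter_nil, hx]
      simp only [Bool.not_false, Bool.false_eq_true, ite_false, ite_true]
      rw [List.append_nil, hfoldl1]
      rw [pv_insertBy_append_of_false _ _ _ _ (fun y hy => by
        simp only [Bool.not_eq_true] at hx
        simp [hx, hmemA y hy])]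
      congr 1
      have := pv_insertBy_append_bucket
        (fun a b => decide ((if r a then (0 : Int) else 1) < (if r b then (0 : Int) else 1)) ||
          (!decide ((if r b then (0 : Int) else 1) < (if r a then (0 : Int) else 1)) && decide (a < b)))
        (fun a b => decide (a < b)) x
        (PySem.List.sorted (ys.filter (fun k => !r k)) (fun k => k)) []
        (fun y hy => by
          simp only [Bool.not_eq_true] at hx
          simp [hx, hmemB y hy])
        (by simp)
      simpa using this

-- B's append-loop is the pair of filters over the traversed list
theorem pv_partition_foldl (p : String → Bool) (l : List String) (r o : List String) :
    l.foldl (fun (acc : List String × List String) k =>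
        if p k then (acc.1 ++ [k], acc.2) else (acc.1, acc.2 ++ [k])) (r, o)
      = (r ++ l.filter p, o ++ l.filter (fun k => !p k)) := by
  induction l generalizing r o with
  | nil => simp
  | cons a l ih =>
    by_cases ha : p a <;> simp [List.foldl_cons, ha, ih]

-- On a duplicate-free list, filtering after the alphabetical sort equals sorting the filter.
theorem pv_filter_sorted (p : String → Bool) (keys : List String) (hnd : keys.Nodup) :
    PySem.List.sorted (keys.filter p) (fun k => k) =
      (PySem.List.sorted keys (fun k => k)).filter p := by
  apply PySem.List.sorted_eq_of_perm_of_pairwise_lt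
  · exact (PySem.List.sorted_perm keys (fun k => k) false).filter p
  · have hle : (PySem.List.sorted keys (fun k => k)).Pairwise (fun a b => a ≤ b) :=
      PySem.List.sorted_pairwise keys (fun k => k)
    have hnd' : (PySem.List.sorted keys (fun k => k)).Nodup :=
      ((PySem.List.sorted_perm keys (fun k => k) false).nodup_iff).2 hnd
    have hlt : (PySem.List.sorted keys (fun k => k)).Pairwise (fun a b : String => a < b) :=
      (hle.and hnd').imp (fun h => lt_of_le_of_ne h.1 h.2)
    exact hlt.sublist List.filter_sublist

-- ===== VERDICT (by name: the statement is the Claim_ definition above) =====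
theorem sort_group_spec : Claim_equal_sort_group := by
  intro entries defaults _
  unfold Spec_sort_group
  simp only [sort_group, sort_group_alt]
  have hnd : (PySem.Dict.ofList entries).keys.Nodup := PySem.Dict.nodup_keys_ofList entries
  have hk : pvSortKeyRank defaults
      = fun k => if ((PySem.Dict.ofList defaults).getD k (false, false)).2 then (0 : Int) else 1 := rfl
  rw [hk, pv_sorted2_bucket (fun k => ((PySem.Dict.ofList defaults).getD k (false, false)).2),
    pv_partition_foldl,
    pv_filter_sorted _ _ hnd, pv_filter_sorted _ _ hnd]
  simp
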